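-- pv_equiv track=rewrite | github.com/reach-sh/reach-lang | scripts/compile-log-analyses/dockerid_longevity.py | calc_cumulative
-- ===== SOURCE A (Python) =====
-- def calc_cumulative(yws):
--   ids = set()
--   ywcounts = {}
--   for yk in sorted(yws.keys()):
--     ws = yws[yk]
--     for wk in sorted(ws.keys()):
--       wcounts = ywcounts.get(yk, {})
--       ywcounts[yk] = wcounts
--       ids = ids.union(ws[wk])
--       wcounts[wk] = len(ids)
--   return ywcounts
-- ===== SOURCE B (Python) =====
-- def calc_cumulative(yws):
--   # pass 0: the (year, week) cells in output order
--   cells = []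
--   for yk in sorted(yws.keys()):
--     for wk in sorted(yws[yk].keys()):
--       cells.append((yk, wk))
--   # pass 1: for each id, the index of the first cell it occurs in
--   first = {}
--   for idx, (yk, wk) in enumerate(cells):
--     for i in yws[yk][wk]:
--       if i not in first:
--         first[i] = idx
--   # how many ids appear for the first time in each cell
--   cnt = {}
--   for v in first.values():
--     cnt[v] = cnt.get(v, 0) + 1
--   # pass 2: prefix-sum the new-id counts over the cells
--   out = {}
--   total = 0
--   for idx, (yk, wk) in enumerate(cells):
--     total += cnt.get(idx, 0)
--     out.setdefault(yk, {})
--     out[yk][wk] = total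
--   return out
-- ===== Notes on version B (the rewrite author's own statement) =====
-- stated objective: faster
-- what changed: Replaces A's per-cell ids.union copy (which rebuilds the whole cumulative set at every week cell) by three linear passes: collect the sorted (year,week) cells, record each id's first-occurrence cell index, tally new ids per cell, and prefix-sum those tallies while building the output.
import Mathlib
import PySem

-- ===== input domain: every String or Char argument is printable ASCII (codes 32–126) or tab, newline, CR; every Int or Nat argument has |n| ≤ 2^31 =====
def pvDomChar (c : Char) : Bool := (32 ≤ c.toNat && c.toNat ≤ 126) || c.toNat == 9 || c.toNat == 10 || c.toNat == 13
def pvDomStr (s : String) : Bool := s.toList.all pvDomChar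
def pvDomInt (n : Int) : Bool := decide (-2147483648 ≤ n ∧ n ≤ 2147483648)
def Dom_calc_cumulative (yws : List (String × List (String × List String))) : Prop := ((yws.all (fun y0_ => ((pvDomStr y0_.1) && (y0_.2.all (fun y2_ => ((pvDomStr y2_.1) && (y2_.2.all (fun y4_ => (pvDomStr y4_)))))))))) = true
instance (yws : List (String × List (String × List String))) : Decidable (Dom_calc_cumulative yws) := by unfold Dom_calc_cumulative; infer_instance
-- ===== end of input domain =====

-- B replaces A's per-cell set-union copies (ids = ids.union(...)) by two linear passes:
-- first-occurrence cell index per id, then a prefix sum of per-cell new-id counts.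

-- ===== PORT A =====
-- A's running state: (ids : set of ids seen so far, ywcounts : year -> (week -> count)).
-- In Python 'wcounts' is aliased into ywcounts before 'wcounts[wk] = len(ids)' mutates it;
-- here that is the two nested inserts below.  yws[yk] / ws[wk] always succeed (keys come
-- from the dict itself), so the lookups are getD with an irrelevant default.
def calc_cumulative (yws : List (String × List (String × List String))) : List (String × List (String × Int)) :=
  let yd := PySem.Dict.mk yws
  let res := (PySem.List.sorted (yws.map (·.1)) (fun k => k) false).foldl
    (fun (st : PySem.Set String × PySem.Dict String (PySem.Dict String Int)) yk =>
      let ws := yd.getD yk []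
      (PySem.List.sorted (ws.map (·.1)) (fun k => k) false).foldl
        (fun st wk =>
          let wcounts := st.2.getD yk PySem.Dict.empty
          let yw1 := st.2.insert yk wcounts
          let ids := PySem.Set.union st.1 ((PySem.Dict.mk ws).getD wk [])
          (ids, yw1.insert yk (wcounts.insert wk (PySem.Set.len ids)))) st)
    (PySem.Set.empty, PySem.Dict.empty)
  res.2.items.map (fun p => (p.1, p.2.items))

-- ===== PORT B =====
-- pass 0 of Source B: the (year, week) cells in output order
def pvCellsB (yws : List (String × List (String × List String))) : List (String × String) :=
  let yd := PySem.Dict.mk yws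
  (PySem.List.sorted (yws.map (·.1)) (fun k => k) false).foldl
    (fun acc yk =>
      (PySem.List.sorted ((yd.getD yk []).map (·.1)) (fun k => k) false).foldl
        (fun acc wk => acc ++ [(yk, wk)]) acc) []

def calc_cumulative_alt (yws : List (String × List (String × List String))) : List (String × List (String × Int)) :=
  let yd := PySem.Dict.mk yws
  let cells := pvCellsB yws
  -- pass 1: for each id, the index of the first cell it occurs in
  let first := (PySem.List.enumerate cells 0).foldl
    (fun d p =>
      ((PySem.Dict.mk (yd.getD p.2.1 [])).getD p.2.2 []).foldl
        (fun d i => if d.contains i then d else d.insert i p.1) d)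
    PySem.Dict.empty
  -- how many ids appear for the first time in each cell
  let cnt := first.values.foldl (fun c v => c.insert v (c.getD v 0 + 1)) PySem.Dict.empty
  -- pass 2: prefix-sum the new-id counts over the cells
  let res := (PySem.List.enumerate cells 0).foldl
    (fun (st : Int × PySem.Dict String (PySem.Dict String Int)) p =>
      let total := st.1 + cnt.getD p.1 0
      let o1 := st.2.setdefault p.2.1 PySem.Dict.empty
      (total, o1.insert p.2.1 ((o1.getD p.2.1 PySem.Dict.empty).insert p.2.2 total)))
    (0, PySem.Dict.empty)
  res.2.items.map (fun p => (p.1, p.2.items))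

-- ===== PRECONDITION & SPEC =====
def Spec_calc_cumulative (yws : List (String × List (String × List String))) (out : List (String × List (String × Int))) : Prop := out = calc_cumulative_alt yws
instance (yws : List (String × List (String × List String))) (out : List (String × List (String × Int))) : Decidable (Spec_calc_cumulative yws out) := by unfold Spec_calc_cumulative; infer_instance

-- ===== CLAIM (what is proved, stated in full; the proofs are below) =====
def Claim_equal_calc_cumulative : Prop := ∀ (yws : List (String × List (String × List String))), Dom_calc_cumulative yws → Spec_calc_cumulative yws (calc_cumulative yws)

-- ===== LEMMAS AND PROOFS =====

-- proof-side view of A: the cells (year, week) in iteration order, the id list of a cell,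
-- and both folds rewritten as folds over the cell list

def pvIdsOf (yws : List (String × List (String × List String))) (c : String × String) : List String :=
  (PySem.Dict.mk ((PySem.Dict.mk yws).getD c.1 [])).getD c.2 []

def pvCells (yws : List (String × List (String × List String))) : List (String × String) :=
  (PySem.List.sorted (yws.map (·.1)) (fun k => k) false).flatMap
    (fun yk => (PySem.List.sorted (((PySem.Dict.mk yws).getD yk []).map (·.1)) (fun k => k) false).map
      (fun wk => (yk, wk)))

def pvStepA (yws : List (String × List (String × List String)))
    (st : PySem.Set String × PySem.Dict String (PySem.Dict String Int)) (c : String × String) :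
    PySem.Set String × PySem.Dict String (PySem.Dict String Int) :=
  let ids := PySem.Set.union st.1 (pvIdsOf yws c)
  (ids, st.2.insert c.1 ((st.2.getD c.1 PySem.Dict.empty).insert c.2 (PySem.Set.len ids)))

def pvFirstD (yws : List (String × List (String × List String)))
    (blocks : List (Int × (String × String))) (d : PySem.Dict String Int) : PySem.Dict String Int :=
  blocks.foldl (fun d p => (pvIdsOf yws p.2).foldl (fun d i => if d.contains i then d else d.insert i p.1) d) d

def pvCnt (yws : List (String × List (String × List String))) : PySem.Dict Int Int :=
  (pvFirstD yws (PySem.List.enumerate (pvCells yws) 0) PySem.Dict.empty).values.foldl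
    (fun c v => c.insert v (c.getD v 0 + 1)) PySem.Dict.empty

def pvStepB (cnt : PySem.Dict Int Int)
    (st : Int × PySem.Dict String (PySem.Dict String Int)) (p : Int × (String × String)) :
    Int × PySem.Dict String (PySem.Dict String Int) :=
  let t := st.1 + cnt.getD p.1 0
  (t, st.2.insert p.2.1 ((st.2.getD p.2.1 PySem.Dict.empty).insert p.2.2 t))

def pvSeen (yws : List (String × List (String × List String)))
    (pre : List (String × String)) : PySem.Set String :=
  PySem.Set.ofList (pre.flatMap (pvIdsOf yws))

lemma A_eq (yws : List (String × List (String × List String))) :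
    calc_cumulative yws
      = (((pvCells yws).foldl (pvStepA yws) (PySem.Set.empty, PySem.Dict.empty)).2.items.map
          (fun p => (p.1, p.2.items))) := by
  unfold calc_cumulative pvCells
  dsimp only []
  rw [List.foldl_flatMap]
  congr 1
  congr 1
  congr 1
  exact PySem.List.foldl_congr_mem _ _ _ _ (fun acc yk _ => by
    rw [List.foldl_map]
    exact PySem.List.foldl_congr_mem _ _ _ _ (fun st wk _ => by
      dsimp only [pvStepA, pvIdsOf]
      rw [PySem.Dict.insert_insert_self]))

lemma stepB_port_eq (cnt : PySem.Dict Int Int)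
    (st : Int × PySem.Dict String (PySem.Dict String Int)) (p : Int × (String × String)) :
    (st.1 + cnt.getD p.1 0,
      (st.2.setdefault p.2.1 PySem.Dict.empty).insert p.2.1
        (((st.2.setdefault p.2.1 PySem.Dict.empty).getD p.2.1 PySem.Dict.empty).insert p.2.2 (st.1 + cnt.getD p.1 0)))
    = pvStepB cnt st p := by
  dsimp only [pvStepB]
  by_cases hc : st.2.contains p.2.1 = true
  · rw [PySem.Dict.setdefault_of_contains _ _ hc]
  · have hc' : st.2.contains p.2.1 = false := by simpa using hc
    rw [PySem.Dict.setdefault_of_not_contains _ _ hc', PySem.Dict.getD_insert_self,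
      PySem.Dict.insert_insert_self, PySem.Dict.getD_of_not_contains _ _ hc']

lemma cellsB_eq (yws : List (String × List (String × List String))) :
    pvCellsB yws = pvCells yws := by
  unfold pvCellsB pvCells
  dsimp only []
  rw [PySem.List.foldl_congr_mem _ _
      (fun acc yk => acc ++ (PySem.List.sorted (((PySem.Dict.mk yws).getD yk []).map (·.1)) (fun k => k) false).map (fun wk => (yk, wk)))
      _ (fun acc yk _ => PySem.List.foldl_append_singleton_eq_map _ _ _),
    PySem.List.foldl_append_eq_flatMap]
  rfl

lemma B_eq (yws : List (String × List (String × List String))) :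
    calc_cumulative_alt yws
      = (((PySem.List.enumerate (pvCells yws) 0).foldl (pvStepB (pvCnt yws)) (0, PySem.Dict.empty)).2.items.map
          (fun p => (p.1, p.2.items))) := by
  unfold calc_cumulative_alt
  dsimp only []
  rw [cellsB_eq]
  dsimp only [pvCnt, pvFirstD, pvIdsOf]
  congr 1
  congr 1
  congr 1
  exact PySem.List.foldl_congr_mem _ _ _ _ (fun st p _ => stepB_port_eq _ st p)

-- id-dict values helper: inserting a fresh key appends its value
lemma values_insert_not_contains {κ ν : Type} [BEq κ] (d : PySem.Dict κ ν) (k : κ) (v : ν)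
    (h : d.contains k = false) : (d.insert k v).values = d.values ++ [v] := by
  simp only [PySem.Dict.values, PySem.Dict.items_insert_of_not_contains d v h, List.map_append,
    List.map_cons, List.map_nil]

-- membership in the first-occurrence dict after one cell's id list
lemma contains_foldl_condIns (lst : List String) (d : PySem.Dict String Int) (idx : Int) (x : String) :
    (lst.foldl (fun d i => if d.contains i then d else d.insert i idx) d).contains x
      = (d.contains x || decide (x ∈ lst)) := by
  induction lst generalizing d with
  | nil => simp
  | cons i lst ih =>
    simp only [List.foldl_cons]
    by_cases hc : d.contains i = true
    · rw [if_pos hc, ih]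
      by_cases hx : x = i
      · subst hx; simp [hc]
      · simp [hx]
    · rw [if_neg hc, ih]
      by_cases hx : x = i
      · subst hx; simp [PySem.Dict.contains_insert_self]
      · rw [PySem.Dict.contains_insert]
        have hxb : (x == i) = false := beq_eq_false_iff_ne.mpr hx
        rw [hxb, Bool.false_or]
        simp [List.mem_cons, hx]

-- a cell with a foreign index does not change the count of n among the values
lemma count_foldl_condIns_ne (lst : List String) (d : PySem.Dict String Int) (idx n : Int)
    (h : idx ≠ n) :
    (lst.foldl (fun d i => if d.contains i then d else d.insert i idx) d).values.count n
      = d.values.count n := by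
  induction lst generalizing d with
  | nil => rfl
  | cons i lst ih =>
    simp only [List.foldl_cons]
    by_cases hc : d.contains i = true
    · rw [if_pos hc, ih]
    · rw [if_neg hc, ih]
      rw [values_insert_not_contains d i idx (by simpa using hc)]
      simp [List.count_append, h]

-- the cell with index idx contributes exactly its new ids to the count of idx
lemma count_foldl_condIns_self (lst : List String) (d : PySem.Dict String Int) (idx : Int) :
    (lst.foldl (fun d i => if d.contains i then d else d.insert i idx) d).values.count idx
      = d.values.count idx
        + (List.filter (fun y => !d.contains y) (PySem.Set.ofList lst)).length := by
  induction lst generalizing d with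
  | nil => simp
  | cons i lst ih =>
    simp only [List.foldl_cons]
    by_cases hc : d.contains i = true
    · rw [if_pos hc, ih, PySem.Set.ofList_cons]
      congr 2
      rw [List.filter_cons_of_neg (by simp [hc])]
      simp only [PySem.Set.discard, List.filter_filter]
      exact List.filter_congr (fun y _ => by
        by_cases hy : y = i
        · subst hy; simp [hc]
        · have : (y == i) = false := beq_eq_false_iff_ne.mpr hy
          simp [this])
    · have hc' : d.contains i = false := by simpa using hc
      rw [if_neg hc, ih, PySem.Set.ofList_cons,
        List.filter_cons_of_pos (by simp [hc']),
        values_insert_not_contains d i idx hc']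
      simp only [List.count_append, List.count_singleton, BEq.rfl, if_pos, List.length_cons]
      have hfilter : List.filter (fun y => !(d.insert i idx).contains y) (PySem.Set.ofList lst)
          = List.filter (fun y => !d.contains y) ((PySem.Set.ofList lst).discard i) := by
        simp only [PySem.Set.discard, List.filter_filter]
        exact List.filter_congr (fun y _ => by
          rw [PySem.Dict.contains_insert]
          cases hy : (y == i) <;> cases hdy : d.contains y <;> simp)
      rw [hfilter]
      omega
  
-- membership in the first-occurrence dict after a list of cells
lemma contains_pvFirstD (yws : List (String × List (String × List String)))
    (blocks : List (Int × (String × String))) (d : PySem.Dict String Int) (x : String) :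
    (pvFirstD yws blocks d).contains x
      = (d.contains x || decide (x ∈ blocks.flatMap (fun p => pvIdsOf yws p.2))) := by
  induction blocks generalizing d with
  | nil => simp [pvFirstD]
  | cons b blocks ih =>
    simp only [pvFirstD, List.foldl_cons] at ih ⊢
    rw [ih, contains_foldl_condIns]
    have : decide (x ∈ List.flatMap (fun p => pvIdsOf yws p.2) (b :: blocks))
        = (decide (x ∈ pvIdsOf yws b.2) || decide (x ∈ List.flatMap (fun p => pvIdsOf yws p.2) blocks)) := by
      rw [List.flatMap_cons, Bool.eq_iff_iff]
      simp [List.mem_append]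
    rw [this, Bool.or_assoc]

-- cells with foreign indices do not change the count of n among the values
lemma count_pvFirstD_ne (yws : List (String × List (String × List String)))
    (blocks : List (Int × (String × String))) (d : PySem.Dict String Int) (n : Int)
    (h : ∀ p ∈ blocks, p.1 ≠ n) :
    (pvFirstD yws blocks d).values.count n = d.values.count n := by
  induction blocks generalizing d with
  | nil => rfl
  | cons b blocks ih =>
    simp only [pvFirstD, List.foldl_cons] at ih ⊢
    rw [ih _ (fun p hp => h p (List.mem_cons_of_mem _ hp)),
      count_foldl_condIns_ne _ _ _ _ (h b (List.mem_cons_self ..))]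

lemma pvFirstD_append (yws : List (String × List (String × List String)))
    (bs cs : List (Int × (String × String))) (d : PySem.Dict String Int) :
    pvFirstD yws (bs ++ cs) d = pvFirstD yws cs (pvFirstD yws bs d) := by
  simp [pvFirstD, List.foldl_append]

lemma enumerate_flatMap {α β : Type} (l : List α) (s : Int) (f : α → List β) :
    (PySem.List.enumerate l s).flatMap (fun p => f p.2) = l.flatMap f := by
  induction l generalizing s with
  | nil => simp [PySem.List.enumerate_nil]
  | cons x l ih => rw [PySem.List.enumerate_cons]; simp [ih]

-- the per-cell new-id count that pass 2 of B adds, read off from cnt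
lemma cnt_getD (yws : List (String × List (String × List String)))
    (pre : List (String × String)) (c : String × String) (suf : List (String × String))
    (h : pvCells yws = pre ++ c :: suf) :
    (pvCnt yws).getD (pre.length : Int) 0
      = ((List.filter (fun y => !((pvSeen yws pre).contains y)) (PySem.Set.ofList (pvIdsOf yws c))).length : Int) := by
  unfold pvCnt
  rw [PySem.Dict.getD_foldl_insert_add_one, PySem.Dict.getD_empty, zero_add, h,
    PySem.List.enumerate_append, PySem.List.enumerate_cons, pvFirstD_append]
  have hmid : pvFirstD yws ((0 + (pre.length : Int), c) :: PySem.List.enumerate suf (0 + (pre.length : Int) + 1))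
      (pvFirstD yws (PySem.List.enumerate pre 0) PySem.Dict.empty)
      = pvFirstD yws (PySem.List.enumerate suf (0 + (pre.length : Int) + 1))
        ((pvIdsOf yws c).foldl (fun d i => if d.contains i then d else d.insert i (0 + (pre.length : Int)))
          (pvFirstD yws (PySem.List.enumerate pre 0) PySem.Dict.empty)) := by
    simp [pvFirstD]
  rw [hmid]
  rw [count_pvFirstD_ne _ _ _ _ (by
    intro p hp
    rw [PySem.List.mem_enumerate_iff] at hp
    obtain ⟨k, hk, rfl⟩ := hp
    simp
    omega)]
  have h0 : (0 : Int) + (pre.length : Int) = (pre.length : Int) := by omega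
  rw [h0, count_foldl_condIns_self]
  rw [count_pvFirstD_ne _ _ _ _ (by
    intro p hp
    rw [PySem.List.mem_enumerate_iff] at hp
    obtain ⟨k, hk, rfl⟩ := hp
    simp
    omega)]
  have hd : (PySem.Dict.empty : PySem.Dict String Int).values.count (pre.length : Int) = 0 := by rfl
  rw [hd, Nat.zero_add]
  congr 1
  exact congrArg List.length (List.filter_congr (fun y _ => by
    rw [contains_pvFirstD, PySem.Dict.contains_empty, Bool.false_or, enumerate_flatMap]
    congr 1
    rw [Bool.eq_iff_iff]
    simp [pvSeen, PySem.Set.mem_ofList]))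

lemma pvSeen_append (yws : List (String × List (String × List String)))
    (pre : List (String × String)) (c : String × String) :
    pvSeen yws (pre ++ [c]) = PySem.Set.update (pvSeen yws pre) (pvIdsOf yws c) := by
  simp [pvSeen, List.flatMap_append, PySem.Set.ofList_append]

lemma len_update (s : PySem.Set String) (lst : List String) :
    PySem.Set.len (PySem.Set.update s lst)
      = PySem.Set.len s + ((List.filter (fun y => !s.contains y) (PySem.Set.ofList lst)).length : Int) := by
  rw [PySem.Set.update_eq_append_filter]
  simp [PySem.Set.len]

-- main invariant: A's running-set fold and B's prefix-sum fold build the same dict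
lemma pass2 (yws : List (String × List (String × List String))) :
    ∀ (suf pre : List (String × String)) (o : PySem.Dict String (PySem.Dict String Int)) (t : Int),
    pvCells yws = pre ++ suf → t = PySem.Set.len (pvSeen yws pre) →
    (suf.foldl (pvStepA yws) (pvSeen yws pre, o)).2
      = ((PySem.List.enumerate suf (pre.length : Int)).foldl (pvStepB (pvCnt yws)) (t, o)).2 := by
  intro suf
  induction suf with
  | nil => intro pre o t _ _; simp [PySem.List.enumerate_nil]
  | cons c suf ih =>
    intro pre o t hcells ht
    rw [PySem.List.enumerate_cons, List.foldl_cons, List.foldl_cons]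
    have hval : PySem.Set.len (PySem.Set.union (pvSeen yws pre) (pvIdsOf yws c))
        = t + (pvCnt yws).getD (pre.length : Int) 0 := by
      rw [cnt_getD yws pre c suf hcells, ht]
      exact len_update _ _
    have hA : pvStepA yws (pvSeen yws pre, o) c
        = (pvSeen yws (pre ++ [c]),
            o.insert c.1 ((o.getD c.1 PySem.Dict.empty).insert c.2 (t + (pvCnt yws).getD (pre.length : Int) 0))) := by
      dsimp only [pvStepA]
      rw [hval, pvSeen_append]
      rfl
    have hB : pvStepB (pvCnt yws) (t, o) ((pre.length : Int), c)
        = (t + (pvCnt yws).getD (pre.length : Int) 0,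
            o.insert c.1 ((o.getD c.1 PySem.Dict.empty).insert c.2 (t + (pvCnt yws).getD (pre.length : Int) 0))) := rfl
    rw [hA, hB]
    have hlen : ((pre.length : Int) + 1) = ((pre ++ [c]).length : Int) := by
      simp
    rw [hlen]
    exact ih (pre ++ [c]) _ _ (by simpa using hcells) (by
      rw [pvSeen_append]
      rw [hval.symm]
      rfl)

-- ===== VERDICT (by name: the statement is the Claim_ definition above) =====
theorem calc_cumulative_spec : Claim_equal_calc_cumulative := by
  intro yws _
  unfold Spec_calc_cumulative
  rw [A_eq, B_eq]
  have h : (List.foldl (pvStepA yws) (PySem.Set.empty, PySem.Dict.empty) (pvCells yws)).2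
      = (List.foldl (pvStepB (pvCnt yws)) (0, PySem.Dict.empty) (PySem.List.enumerate (pvCells yws) 0)).2 :=
    pass2 yws (pvCells yws) [] PySem.Dict.empty 0 rfl rfl
  rw [h]
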